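-- pv_equiv track=rewrite | github.com/Naveenkumarrao/AIFACTBOT | src/utils.py | pick_verdict
-- ===== SOURCE A (Python) =====
-- def pick_verdict(labels: list[str]) -> str:
--     if not labels:
--         return "Uncertain"
--     if all(l == "TRUE" for l in labels):
--         return "True"
--     if all(l == "FALSE" for l in labels):
--         return "False"
--     if any(l == "UNCERTAIN" for l in labels):
--         return "Mixed"
--     return "Mixed"
-- ===== SOURCE B (Python) =====
-- def pick_verdict(labels: list[str]) -> str:
--     if not labels:
--         return "Uncertain"
--     head = labels[0]
--     for l in labels:
--         if l != head:
--             return "Mixed"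
--     return {"TRUE": "True", "FALSE": "False"}.get(head, "Mixed")
-- ===== Notes on version B (the rewrite author's own statement) =====
-- stated objective: simpler
-- what changed: Instead of A's two staged all(...) scans against fixed labels (plus a dead any branch), B makes one early-exit pass checking uniformity against the first element and then maps the single surviving label through a verdict lookup table.
import Mathlib
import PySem

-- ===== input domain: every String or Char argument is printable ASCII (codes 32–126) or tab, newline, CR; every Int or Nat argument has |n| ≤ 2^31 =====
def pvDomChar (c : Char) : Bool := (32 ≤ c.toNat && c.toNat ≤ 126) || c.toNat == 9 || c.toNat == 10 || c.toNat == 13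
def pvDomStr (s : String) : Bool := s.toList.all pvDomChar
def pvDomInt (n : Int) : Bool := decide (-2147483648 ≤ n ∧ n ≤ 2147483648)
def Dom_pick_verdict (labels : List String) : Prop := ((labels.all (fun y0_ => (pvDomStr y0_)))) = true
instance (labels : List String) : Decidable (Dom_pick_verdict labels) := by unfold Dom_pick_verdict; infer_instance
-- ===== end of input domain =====

-- B replaces A's staged all(...) scans (and the dead any branch) with one early-exit uniformity
-- pass against the first label followed by a verdict lookup table; objective: simpler.


-- ===== PORT A =====
def pick_verdict (labels : List String) : String :=
  if labels.isEmpty then "Uncertain"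
  else if labels.all (fun l => l == "TRUE") then "True"
  else if labels.all (fun l => l == "FALSE") then "False"
  else if labels.any (fun l => l == "UNCERTAIN") then "Mixed"
  else "Mixed"

-- ===== PORT B =====
-- the early-exit uniformity loop of Source B: returns true iff every element equals head
def pvUniform (head : String) : List String → Bool
  | [] => true
  | l :: t => if l != head then false else pvUniform head t

def pick_verdict_alt (labels : List String) : String :=
  match labels with
  | [] => "Uncertain"
  | head :: _ =>
    if pvUniform head labels then
      (PySem.Dict.ofList [("TRUE", "True"), ("FALSE", "False")]).getD head "Mixed"
    else "Mixed"

-- ===== PRECONDITION & SPEC =====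
def Spec_pick_verdict (labels : List String) (out : String) : Prop := out = pick_verdict_alt labels
instance (labels : List String) (out : String) : Decidable (Spec_pick_verdict labels out) := by unfold Spec_pick_verdict; infer_instance

-- ===== CLAIM =====
def Claim_equal_pick_verdict : Prop := ∀ (labels : List String), Dom_pick_verdict labels → Spec_pick_verdict labels (pick_verdict labels)

-- ===== LEMMAS AND PROOFS =====
theorem pvUniform_iff (head : String) (xs : List String) :
    pvUniform head xs = true ↔ ∀ x ∈ xs, x = head := by
  induction xs with
  | nil => simp [pvUniform]
  | cons a t ih =>
    simp only [pvUniform, bne_iff_ne, ne_eq, ite_not]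
    by_cases h : a = head
    · simp [h, ih]
    · simp [h]

theorem all_eq_uniform_head (v head : String) (t : List String) :
    ((head :: t).all (fun l => l == v) = true) ↔
      (pvUniform head (head :: t) = true ∧ head = v) := by
  rw [pvUniform_iff]
  simp only [List.all_eq_true, beq_iff_eq, List.mem_cons]
  constructor
  · intro h
    have hh : head = v := h head (Or.inl rfl)
    refine ⟨fun x hx => ?_, hh⟩
    rcases hx with h1 | h1
    · exact h1
    · exact (h x (Or.inr h1)).trans hh.symm
  · rintro ⟨hu, hv⟩ x hx
    rcases hx with h1 | h1
    · rw [h1, hv]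
    · rw [hu x (Or.inr h1), hv]

-- ===== VERDICT =====
theorem pick_verdict_spec : Claim_equal_pick_verdict := by
  intro labels _
  unfold Spec_pick_verdict pick_verdict pick_verdict_alt
  cases labels with
  | nil => rfl
  | cons head t =>
    simp only [List.isEmpty_cons, if_neg Bool.false_ne_true]
    have hT := all_eq_uniform_head "TRUE" head t
    have hF := all_eq_uniform_head "FALSE" head t
    by_cases hu : pvUniform head (head :: t) = true
    · rw [if_pos hu]
      by_cases h1 : head = "TRUE"
      · rw [if_pos (hT.mpr ⟨hu, h1⟩), h1]; rfl
      · rw [if_neg (fun h => h1 (hT.mp h).2)]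
        by_cases h2 : head = "FALSE"
        · rw [if_pos (hF.mpr ⟨hu, h2⟩), h2]; rfl
        · rw [if_neg (fun h => h2 (hF.mp h).2)]
          have hb1 : ("TRUE" == head) = false := by simp [Ne.symm h1]
          have hb2 : ("FALSE" == head) = false := by simp [Ne.symm h2]
          have : (PySem.Dict.ofList [("TRUE", "True"), ("FALSE", "False")]).getD head "Mixed" = "Mixed" := by
            simp [PySem.Dict.ofList, PySem.Dict.getD, PySem.Dict.get?, PySem.Dict.empty,
              PySem.Dict.update, PySem.Dict.insert, List.find?, hb1, hb2]
          rw [this]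
          split <;> rfl
    · rw [if_neg hu,
        if_neg (fun h => hu (hT.mp h).1),
        if_neg (fun h => hu (hF.mp h).1)]
      split <;> rfl
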